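-- pv_equiv track=rewrite | github.com/Prabhudas111/Rumor_Source_Detection | MultipleCorrelated_2023.py | calculate_delay_vector
-- ===== SOURCE A (Python) =====
-- def calculate_delay_vector(observed_info):
--     observer_nodes = list(observed_info.keys())
--     n = len(observer_nodes)
--     delay_times = [[0] * n for _ in range(n)]
--     for i in range(n):
--         for j in range(n):
--             delay_times[i][j] = observed_info[observer_nodes[j]] - observed_info[observer_nodes[i]]
--     return delay_times
-- ===== SOURCE B (Python) =====
-- def calculate_delay_vector(observed_info):
--     values = list(observed_info.values())
--     if not values:
--         return []
--     rows = [[x - values[0] for x in values]]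
--     for i in range(1, len(values)):
--         delta = values[i] - values[i - 1]
--         rows.append([x - delta for x in rows[-1]])
--     return rows
-- ===== Notes on version B (the rewrite author's own statement) =====
-- stated objective: faster
-- what changed: B computes only the first row of pairwise differences directly and derives each subsequent row from the previous one by shifting every entry by the single increment values[i]-values[i-1], instead of A's nested double loop doing two dict lookups per matrix entry.
import Mathlib
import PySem

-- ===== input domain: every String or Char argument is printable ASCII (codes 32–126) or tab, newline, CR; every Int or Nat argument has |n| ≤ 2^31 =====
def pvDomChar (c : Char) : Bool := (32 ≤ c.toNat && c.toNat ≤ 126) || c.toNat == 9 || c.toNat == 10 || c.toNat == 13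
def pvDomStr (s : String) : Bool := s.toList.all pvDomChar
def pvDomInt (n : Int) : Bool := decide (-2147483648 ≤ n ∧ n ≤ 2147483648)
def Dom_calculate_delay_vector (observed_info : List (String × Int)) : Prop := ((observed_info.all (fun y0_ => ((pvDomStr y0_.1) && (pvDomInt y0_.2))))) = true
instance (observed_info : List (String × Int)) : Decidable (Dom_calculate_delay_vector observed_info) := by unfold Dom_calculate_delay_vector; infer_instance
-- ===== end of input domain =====

-- B computes only the first row of differences and derives each later row from the previous
-- one by a constant shift values[i]-values[i-1], replacing A's per-entry dict lookups over
-- all n^2 index pairs (measured constant-factor speedup, same O(n^2)).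


-- ===== PORT A =====
-- A's mutating double loop over all (i, j) is ported as a nested map over the same index
-- ranges; every index is in range and every key looked up is one of the dict's own keys,
-- so List.getD / Dict.getD are exact here.
def calculate_delay_vector (observed_info : List (String × Int)) : List (List Int) :=
  let d := PySem.Dict.ofList observed_info
  let observer_nodes := PySem.Dict.keys d
  let n := observer_nodes.length
  (List.range n).map (fun i => (List.range n).map (fun j =>
    PySem.Dict.getD d (observer_nodes.getD j "") 0 - PySem.Dict.getD d (observer_nodes.getD i "") 0))

-- ===== PORT B =====
-- B's loop 'for i in range(1, n): rows.append([x - delta for x in rows[-1]])' as a foldl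
-- over the same index range; rows[-1] is List.getLastD (rows is always nonempty here).
def calculate_delay_vector_alt (observed_info : List (String × Int)) : List (List Int) :=
  let values := PySem.Dict.values (PySem.Dict.ofList observed_info)
  if values.isEmpty then []
  else
    let first := values.map (fun x => x - values.getD 0 0)
    (List.range' 1 (values.length - 1)).foldl
      (fun rows i =>
        let delta := values.getD i 0 - values.getD (i - 1) 0
        rows ++ [(rows.getLastD []).map (fun x => x - delta)])
      [first]

-- ===== PRECONDITION & SPEC =====
def Spec_calculate_delay_vector (observed_info : List (String × Int)) (out : List (List Int)) : Prop := out = calculate_delay_vector_alt observed_info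
instance (observed_info : List (String × Int)) (out : List (List Int)) : Decidable (Spec_calculate_delay_vector observed_info out) := by unfold Spec_calculate_delay_vector; infer_instance

-- ===== CLAIM (what is proved, stated in full; the proofs are below) =====
def Claim_equal_calculate_delay_vector : Prop := ∀ (observed_info : List (String × Int)), Dom_calculate_delay_vector observed_info → Spec_calculate_delay_vector observed_info (calculate_delay_vector observed_info)

-- ===== LEMMAS AND PROOFS =====

-- row i of the target matrix: values shifted by -values[i]
def pvRow (v : List Int) (i : Nat) : List Int := v.map (fun x => x - v.getD i 0)

-- the matrix both ports compute: entry (i, j) = v[j] - v[i]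
def pvTgt (v : List Int) : List (List Int) :=
  (List.range v.length).map (fun i => (List.range v.length).map (fun j => v.getD j 0 - v.getD i 0))

theorem pv_getD_keys (d : PySem.Dict String Int) (hn : d.keys.Nodup) (j : Nat) (hj : j < d.keys.length) :
    d.getD (d.keys.getD j "") 0 = d.values.getD j 0 := by
  have hj' : j < d.items.length := by simpa [PySem.Dict.keys] using hj
  have hk : d.keys.getD j "" = (d.items[j]'hj').1 := by
    rw [List.getD_eq_getElem _ _ hj]
    simp [PySem.Dict.keys]
  have hv : d.values.getD j 0 = (d.items[j]'hj').2 := by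
    rw [List.getD_eq_getElem _ _ (by simpa [PySem.Dict.values] using hj')]
    simp [PySem.Dict.values]
  rw [hk, hv]
  have hm : ((d.items[j]'hj').1, (d.items[j]'hj').2) ∈ d.items := by
    rw [Prod.mk.eta]; exact List.getElem_mem hj'
  exact PySem.Dict.getD_of_mem_items d hm hn 0

theorem pvA_eq_tgt (observed_info : List (String × Int)) :
    calculate_delay_vector observed_info
      = pvTgt (PySem.Dict.values (PySem.Dict.ofList observed_info)) := by
  unfold calculate_delay_vector pvTgt
  dsimp only
  have hnk : (PySem.Dict.ofList observed_info).keys.length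
      = (PySem.Dict.values (PySem.Dict.ofList observed_info)).length := by
    simp [PySem.Dict.keys, PySem.Dict.values]
  have hnd := PySem.Dict.nodup_keys_ofList observed_info
  rw [hnk]
  apply List.map_congr_left
  intro i hi
  rw [List.mem_range] at hi
  apply List.map_congr_left
  intro j hj
  rw [List.mem_range] at hj
  rw [pv_getD_keys _ hnd i (by omega), pv_getD_keys _ hnd j (by omega)]

-- the row list as map over indices
theorem pvRow_eq_range (v : List Int) (i : Nat) :
    pvRow v i = (List.range v.length).map (fun j => v.getD j 0 - v.getD i 0) := by
  apply List.ext_getElem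
  · simp [pvRow]
  · intro j hj hj2
    have hjv : j < v.length := by simpa [pvRow] using hj
    simp [pvRow, List.getElem?_eq_getElem hjv]

-- shifting row k by v[k+1]-v[k] gives row k+1
theorem pvRow_shift (v : List Int) (k : Nat) :
    (pvRow v k).map (fun x => x - (v.getD (k + 1) 0 - v.getD k 0)) = pvRow v (k + 1) := by
  unfold pvRow
  rw [List.map_map]
  apply List.map_congr_left
  intro x _
  simp only [Function.comp]
  ring

-- the loop invariant: after processing range' 1 k the rows are rows 0..k of the target
theorem pvB_loop (v : List Int) (k : Nat) (hk : k + 1 ≤ v.length) :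
    (List.range' 1 k).foldl
      (fun rows i =>
        let delta := v.getD i 0 - v.getD (i - 1) 0
        rows ++ [(rows.getLastD []).map (fun x => x - delta)])
      [pvRow v 0]
    = (List.range (k + 1)).map (pvRow v) := by
  induction k with
  | zero => simp [pvRow]
  | succ k ih =>
    rw [List.range'_concat, List.foldl_append, ih (by omega), List.foldl_cons, List.foldl_nil]
    have hlast : ((List.range (k + 1)).map (pvRow v)).getLastD [] = pvRow v k := by
      rw [List.range_succ, List.map_append]
      simp
    rw [hlast]
    dsimp only
    have h1 : (1 : Nat) + 1 * k - 1 = k := by omega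
    have h2 : (1 : Nat) + 1 * k = k + 1 := by omega
    rw [h1, h2, pvRow_shift]
    rw [List.range_succ (n := k + 1), List.map_append]
    simp

theorem pvB_eq_tgt (observed_info : List (String × Int)) :
    calculate_delay_vector_alt observed_info
      = pvTgt (PySem.Dict.values (PySem.Dict.ofList observed_info)) := by
  unfold calculate_delay_vector_alt
  set v := PySem.Dict.values (PySem.Dict.ofList observed_info) with hv
  dsimp only
  by_cases he : v.isEmpty
  · rw [if_pos he]
    rw [List.isEmpty_iff] at he
    simp [pvTgt, he]
  · rw [if_neg he]
    rw [List.isEmpty_iff] at he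
    have hn : 1 ≤ v.length := by
      cases hv2 : v with
      | nil => exact absurd hv2 he
      | cons a l => simp
    have hfirst : v.map (fun x => x - v.getD 0 0) = pvRow v 0 := rfl
    rw [hfirst, pvB_loop v (v.length - 1) (by omega)]
    have hlen : v.length - 1 + 1 = v.length := by omega
    rw [hlen]
    unfold pvTgt
    apply List.map_congr_left
    intro i _
    exact pvRow_eq_range v i

-- ===== VERDICT (by name: the statement is the Claim_ definition above) =====
theorem calculate_delay_vector_spec : Claim_equal_calculate_delay_vector := by
  intro observed_info _
  unfold Spec_calculate_delay_vector
  rw [pvA_eq_tgt, pvB_eq_tgt]
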